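-- pv_equiv track=rewrite | github.com/quattie528/pylibq | xb.py | dateien4erb
-- ===== SOURCE A (Python) =====
-- def dateien4erb(dateien,letzt):
-- 	res = []
-- 	geh = False
-- 	for datei in dateien:
-- 		if datei == letzt:
-- 			geh = True
-- 			continue
-- 		if geh == False:
-- 			continue
-- 		res.append(datei)
-- 	return res
-- ===== SOURCE B (Python) =====
-- def dateien4erb(dateien, letzt):
--     try:
--         i = dateien.index(letzt)
--     except ValueError:
--         return []
--     return [d for d in dateien[i + 1:] if d != letzt]
-- ===== Notes on version B (the rewrite author's own statement) =====
-- stated objective: simpler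
-- what changed: Replaced the flag-driven single pass with a find-the-first-marker-index step followed by a comprehension filtering the tail slice dateien[i+1:].
import Mathlib
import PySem

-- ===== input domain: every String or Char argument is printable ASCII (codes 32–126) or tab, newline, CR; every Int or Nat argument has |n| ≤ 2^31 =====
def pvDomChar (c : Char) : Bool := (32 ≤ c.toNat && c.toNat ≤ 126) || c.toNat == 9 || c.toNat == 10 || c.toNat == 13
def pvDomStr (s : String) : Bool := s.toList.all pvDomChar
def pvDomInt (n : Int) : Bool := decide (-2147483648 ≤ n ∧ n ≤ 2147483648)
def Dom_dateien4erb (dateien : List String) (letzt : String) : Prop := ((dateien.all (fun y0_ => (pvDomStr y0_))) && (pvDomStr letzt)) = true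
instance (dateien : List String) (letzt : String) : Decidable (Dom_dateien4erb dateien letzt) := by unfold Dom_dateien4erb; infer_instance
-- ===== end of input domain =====

-- B replaces A's flag-driven single pass by finding the first index of the marker and filtering the tail slice (objective: simpler).


-- ===== PORT A =====
-- Port of A: flag-driven loop accumulating res.
def dateien4erbGo (letzt : String) : List String → Bool → List String → List String
  | [], _, res => res
  | datei :: rest, geh, res =>
    if datei == letzt then dateien4erbGo letzt rest true res
    else if geh == false then dateien4erbGo letzt rest geh res
    else dateien4erbGo letzt rest geh (res ++ [datei])

def dateien4erb (dateien : List String) (letzt : String) : List String :=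
  dateien4erbGo letzt dateien false []

-- ===== PORT B =====
-- Port of B: first-occurrence index, then filter the tail slice.
def dateien4erb_alt (dateien : List String) (letzt : String) : List String :=
  match PySem.List.index? dateien letzt with
  | none => []
  | some i => (PySem.List.slice dateien (Int.ofNat (i + 1)) none).filter (fun d => d != letzt)

-- ===== PRECONDITION & SPEC =====
def Spec_dateien4erb (dateien : List String) (letzt : String) (out : List String) : Prop := out = dateien4erb_alt dateien letzt
instance (dateien : List String) (letzt : String) (out : List String) : Decidable (Spec_dateien4erb dateien letzt out) := by unfold Spec_dateien4erb; infer_instance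

-- ===== CLAIM (what is proved, stated in full; the proofs are below) =====
def Claim_equal_dateien4erb : Prop := ∀ (dateien : List String) (letzt : String), Dom_dateien4erb dateien letzt → Spec_dateien4erb dateien letzt (dateien4erb dateien letzt)

-- ===== LEMMAS AND PROOFS =====

-- ===== VERDICT (by name: the statement is the Claim_ definition above) =====
lemma go_true (letzt : String) (rest res : List String) :
    dateien4erbGo letzt rest true res = res ++ rest.filter (fun d => d != letzt) := by
  induction rest generalizing res with
  | nil => simp [dateien4erbGo]
  | cons d ds ih =>
    by_cases h : d = letzt
    · simp [dateien4erbGo, h, ih]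
    · simp [dateien4erbGo, h, ih]

lemma go_false (letzt : String) (rest : List String) :
    dateien4erbGo letzt rest false [] =
      match PySem.List.index? rest letzt with
      | none => []
      | some i => (rest.drop (i + 1)).filter (fun d => d != letzt) := by
  induction rest with
  | nil => simp [dateien4erbGo, PySem.List.index?]
  | cons d ds ih =>
    by_cases h : d = letzt
    · subst h
      rw [dateien4erbGo, if_pos (by simp), go_true, PySem.List.index?_cons_self]
      simp
    · rw [dateien4erbGo, if_neg (by simpa using h), if_pos (by decide), ih,
        PySem.List.index?_cons_of_ne ds h]
      cases PySem.List.index? ds letzt <;> simp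

theorem dateien4erb_spec : Claim_equal_dateien4erb := by
  intro dateien letzt _
  unfold Spec_dateien4erb dateien4erb dateien4erb_alt
  rw [go_false]
  cases PySem.List.index? dateien letzt with
  | none => rfl
  | some i =>
    dsimp only
    rw [show (Int.ofNat (i + 1)) = ((i + 1 : Nat) : Int) from rfl,
      PySem.List.slice_from_natCast]
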